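-- pv_equiv track=rewrite | github.com/MicrobialDarkMatter/GraphMB | src/graphemb/evaluate.py | get_markers_to_contigs
-- ===== SOURCE A (Python) =====
-- def get_markers_to_contigs(marker_sets, contigs):
--     """Get marker to contig mapping
--
--     :param marker_sets: Marker sets from CheckM
--     :type marker_sets: set
--     :param contigs: Contig to marker mapping
--     :type contigs: dict
--     :return: Marker to contigs list mapping
--     :rtype: dict
--     """
--     marker2contigs = {}
--     for marker_set in marker_sets:
--         for gene in marker_set:
--             marker2contigs[gene] = []
--             for contig in contigs:
--                 if gene in contigs[contig]:
--                     marker2contigs[gene].append(contig)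
--     return marker2contigs
-- ===== SOURCE B (Python) =====
-- def get_markers_to_contigs(marker_sets, contigs):
--     """Get marker to contig mapping (inverted index: one pass over contigs)."""
--     index = {}
--     for contig, genes in contigs.items():
--         for gene in dict.fromkeys(genes):
--             index.setdefault(gene, []).append(contig)
--     return {gene: list(index.get(gene, ()))
--             for marker_set in marker_sets for gene in marker_set}
-- ===== Notes on version B (the rewrite author's own statement) =====
-- stated objective: faster
-- what changed: Instead of scanning every contig for every gene (genes x contigs membership tests), B builds an inverted gene-to-contigs index in one pass over the contigs and then assembles the result by dictionary lookup per gene.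
import Mathlib
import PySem

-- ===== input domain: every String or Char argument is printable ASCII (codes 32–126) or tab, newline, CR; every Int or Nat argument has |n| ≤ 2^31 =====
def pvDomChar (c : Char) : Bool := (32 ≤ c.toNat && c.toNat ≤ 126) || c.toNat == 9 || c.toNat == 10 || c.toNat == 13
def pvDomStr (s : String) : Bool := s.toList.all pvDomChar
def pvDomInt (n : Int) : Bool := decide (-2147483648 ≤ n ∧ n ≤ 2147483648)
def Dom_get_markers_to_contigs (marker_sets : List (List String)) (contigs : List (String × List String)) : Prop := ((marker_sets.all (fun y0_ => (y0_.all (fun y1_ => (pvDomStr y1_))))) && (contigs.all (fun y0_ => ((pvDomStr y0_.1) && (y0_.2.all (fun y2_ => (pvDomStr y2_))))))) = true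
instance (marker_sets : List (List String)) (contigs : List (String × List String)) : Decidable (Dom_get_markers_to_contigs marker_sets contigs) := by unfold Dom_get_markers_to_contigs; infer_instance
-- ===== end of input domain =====

-- B replaces A's per-gene scan of all contigs by an inverted index built in one pass over the contigs (objective: faster, asymptotically).

-- ===== PORT A =====
-- A: for each marker set, for each gene: marker2contigs[gene] = [], then scan all
-- contigs and append those whose marker list contains the gene.
def get_markers_to_contigs (marker_sets : List (List String)) (contigs : List (String × List String)) : List (String × List String) :=
  (marker_sets.foldl (fun d marker_set =>
    marker_set.foldl (fun d gene =>
      contigs.foldl (fun d p =>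
        if gene ∈ p.2 then d.modify gene [] (· ++ [p.1]) else d)
        (d.insert gene [])) d)
    PySem.Dict.empty).items

-- ===== PORT B =====
-- B: one pass over contigs building gene → contigs (dedup per contig via dict.fromkeys),
-- then a dict comprehension over the marker sets looking each gene up.
def get_markers_to_contigs_alt (marker_sets : List (List String)) (contigs : List (String × List String)) : List (String × List String) :=
  let index : PySem.Dict String (List String) :=
    contigs.foldl (fun ix p =>
      (PySem.List.dedup p.2).foldl (fun ix gene => ix.modify gene [] (· ++ [p.1])) ix)
      PySem.Dict.empty
  (marker_sets.foldl (fun d marker_set =>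
    marker_set.foldl (fun d gene => d.insert gene (index.getD gene [])) d)
    PySem.Dict.empty).items

-- ===== PRECONDITION & SPEC =====
def Spec_get_markers_to_contigs (marker_sets : List (List String)) (contigs : List (String × List String)) (out : List (String × List String)) : Prop := out = get_markers_to_contigs_alt marker_sets contigs
instance (marker_sets : List (List String)) (contigs : List (String × List String)) (out : List (String × List String)) : Decidable (Spec_get_markers_to_contigs marker_sets contigs out) := by unfold Spec_get_markers_to_contigs; infer_instance

-- ===== CLAIM (what is proved, stated in full; the proofs are below) =====
def Claim_equal_get_markers_to_contigs : Prop := ∀ (marker_sets : List (List String)) (contigs : List (String × List String)), Dom_get_markers_to_contigs marker_sets contigs → Spec_get_markers_to_contigs marker_sets contigs (get_markers_to_contigs marker_sets contigs)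

-- ===== LEMMAS AND PROOFS =====

-- The contigs A's inner scan collects for a gene.
def pvHits (contigs : List (String × List String)) (gene : String) : List String :=
  (contigs.filter (fun p => decide (gene ∈ p.2))).map Prod.fst

-- A's inner scan over the contigs equals a single insert of the filtered contig list.
theorem pvA_inner (contigs : List (String × List String)) (d : PySem.Dict String (List String)) (gene : String) (v : List String) :
    contigs.foldl (fun d p => if gene ∈ p.2 then d.modify gene [] (· ++ [p.1]) else d) (d.insert gene v)
      = d.insert gene (v ++ pvHits contigs gene) := by
  induction contigs generalizing v with
  | nil => simp [pvHits]
  | cons p t ih =>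
    by_cases h : gene ∈ p.2
    · have hmod : (d.insert gene v).modify gene [] (· ++ [p.1]) = d.insert gene (v ++ [p.1]) := by
        apply PySem.Dict.ext
        simp [PySem.Dict.getD_insert_self, PySem.Dict.insert_insert_self, PySem.Dict.modify]
      simp only [List.foldl_cons, if_pos h, hmod, ih]
      simp [pvHits, h]
    · simp only [List.foldl_cons, if_neg h, ih]
      simp [pvHits, h]

-- Filtering a Nodup list for equality with gene yields at most the singleton.
theorem pvFilter_nodup (l : List String) (gene : String) (hnd : l.Nodup) :
    l.filter (fun g => g == gene) = if gene ∈ l then [gene] else [] := by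
  induction l with
  | nil => simp
  | cons a t ih =>
    rcases List.nodup_cons.mp hnd with ⟨ha, ht⟩
    by_cases hag : a = gene
    · subst hag
      simp [ih ht, ha]
    · have : gene ∈ a :: t ↔ gene ∈ t := by simp [Ne.symm hag]
      simp [hag, ih ht, this]

-- B's index lookup returns exactly A's filtered contig list.
theorem pvIndex_getD (contigs : List (String × List String)) (ix : PySem.Dict String (List String)) (gene : String) :
    (contigs.foldl (fun ix p =>
        (PySem.List.dedup p.2).foldl (fun ix g => ix.modify g [] (· ++ [p.1])) ix) ix).getD gene []
      = ix.getD gene [] ++ pvHits contigs gene := by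
  induction contigs generalizing ix with
  | nil => simp [pvHits]
  | cons p t ih =>
    simp only [List.foldl_cons, ih]
    have hstep : ((PySem.List.dedup p.2).foldl (fun ix g => ix.modify g [] (· ++ [p.1])) ix).getD gene []
        = ix.getD gene [] ++ (if gene ∈ p.2 then [p.1] else []) := by
      have := PySem.Dict.getD_foldl_modify_append
        (l := (PySem.List.dedup p.2).map (fun g => (g, p.1))) (d := ix) (c := gene)
      rw [List.foldl_map] at this
      rw [this]
      have hfm : (((PySem.List.dedup p.2).map (fun g => (g, p.1))).filter (fun q => q.1 == gene)).map (·.2)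
          = ((PySem.List.dedup p.2).filter (fun g => g == gene)).map (fun _ => p.1) := by
        rw [List.filter_map, List.map_map]; rfl
      rw [hfm, pvFilter_nodup _ _ (PySem.List.nodup_dedup p.2)]
      by_cases h : gene ∈ p.2 <;> simp [h]
    rw [hstep]
    by_cases h : gene ∈ p.2 <;> simp [pvHits, h]

-- ===== VERDICT (by name: the statement is the Claim_ definition above) =====
theorem get_markers_to_contigs_spec : Claim_equal_get_markers_to_contigs := by
  intro marker_sets contigs _
  unfold Spec_get_markers_to_contigs get_markers_to_contigs get_markers_to_contigs_alt
  have hstep : ∀ (d : PySem.Dict String (List String)) (gene : String),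
      contigs.foldl (fun d p => if gene ∈ p.2 then d.modify gene [] (· ++ [p.1]) else d)
        (d.insert gene [])
        = d.insert gene ((contigs.foldl (fun ix p =>
            (PySem.List.dedup p.2).foldl (fun ix g => ix.modify g [] (· ++ [p.1])) ix)
            PySem.Dict.empty).getD gene []) := by
    intro d gene
    rw [pvA_inner contigs d gene [], pvIndex_getD contigs PySem.Dict.empty gene]
    simp [PySem.Dict.getD_empty]
  simp only [hstep]
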